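-- pv_equiv track=rewrite | github.com/hadarlevi154/NLP_RAG_IE_IR | RAG/InformationRetrievalGivenQuery.py | generate_extractive_response
-- ===== SOURCE A (Python) =====
-- def generate_extractive_response(query, documents):
--     """
--        Creates a simple extractive summary from documents when API generation fails.
--
--        This function:
--        1. Extracts and normalizes sentences from all documents
--        2. Ranks sentences by relevance to query keywords
--        3. Selects top relevant sentences or defaults to first sentences
--        4. Formats them into a coherent response
--
--        Returns:
--            str: Extractive summary based on the most relevant sentences
--        """
--
--     sentences = []
--     for doc in documents:
--         doc_sentences = doc.replace("\n", " ").split(". ")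
--         sentences.extend([s.strip() for s in doc_sentences if s.strip()])
--
--     # Simple keyword matching to find relevant sentences
--     query_keywords = query.lower().split()
--     relevant_sentences = []
--
--     for sentence in sentences:
--         # Count keyword matches
--         match_count = sum(1 for keyword in query_keywords if keyword.lower() in sentence.lower())
--         if match_count > 0:
--             relevant_sentences.append((sentence, match_count))
--
--     # Sort by relevance and take top sentences
--     relevant_sentences.sort(key=lambda x: x[1], reverse=True)
--     top_sentences = [s[0] for s in relevant_sentences[:3]]
--
--     if not top_sentences:
--         # If no matching sentences, just take the first few from the documents
--         top_sentences = sentences[:3] if len(sentences) >= 3 else sentences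
--
--     response = f"Based on the retrieved documents:\n\n"
--     response += ". ".join(top_sentences)
--     if not response.endswith("."):
--         response += "."
--
--     return response
-- ===== SOURCE B (Python) =====
-- def generate_extractive_response(query, documents):
--     """Extractive summary via threshold passes: precompute each sentence's
--     keyword score once, then collect sentences at each score level from the
--     highest possible score (len(keywords)) down to 1, instead of sorting
--     scored (sentence, count) pairs."""
--     sentences = [t for doc in documents
--                  for t in (p.strip() for p in doc.replace("\n", " ").split(". "))
--                  if t]
--     keywords = query.lower().split()
--     scores = [sum(kw in s.lower() for kw in keywords) for s in sentences]
--     top = [s for k in range(len(keywords), 0, -1)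
--            for s, c in zip(sentences, scores) if c == k][:3]
--     if not top:
--         top = sentences[:3]
--     out = "Based on the retrieved documents:\n\n" + ". ".join(top)
--     return out if out.endswith(".") else out + "."
-- ===== Notes on version B (the rewrite author's own statement) =====
-- stated objective: faster
-- what changed: Replaces A's collect-(sentence,count)-pairs-then-stable-sort ranking by precomputing each sentence's score once and making one threshold pass per score level from len(keywords) down to 1 (a counting-style selection over flat lists, no pair list and no sort), reproducing the stable descending order including tie ordering; sentence extraction becomes one flat comprehension instead of an extend loop.
import Mathlib
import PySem

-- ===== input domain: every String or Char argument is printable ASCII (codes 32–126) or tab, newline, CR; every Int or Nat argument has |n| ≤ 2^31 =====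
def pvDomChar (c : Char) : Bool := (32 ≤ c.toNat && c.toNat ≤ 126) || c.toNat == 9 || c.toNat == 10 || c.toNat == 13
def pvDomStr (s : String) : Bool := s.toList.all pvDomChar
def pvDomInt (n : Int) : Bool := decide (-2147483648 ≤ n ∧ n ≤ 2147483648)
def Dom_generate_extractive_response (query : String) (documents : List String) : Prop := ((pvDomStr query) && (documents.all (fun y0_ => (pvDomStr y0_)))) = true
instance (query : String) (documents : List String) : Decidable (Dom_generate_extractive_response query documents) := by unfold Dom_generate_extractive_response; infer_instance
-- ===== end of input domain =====

-- B replaces A's collect-pairs-then-stable-sort ranking by a precomputed score list and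
-- one threshold pass per score level from len(keywords) down to 1 (same output, tie order included).

-- ===== PORT A =====
def generate_extractive_response (query : String) (documents : List String) : String :=
  -- sentences = []; for doc in documents: ... extend([s.strip() for s in doc_sentences if s.strip()])
  let sentences : List String :=
    documents.foldl (fun sentences doc =>
      let doc_sentences := (PySem.Str.split? (PySem.Str.replace doc "\n" " ") ". ").getD []   -- sep ". " ≠ "", so split? is always `some`
      sentences ++ ((doc_sentences.map (fun s => PySem.Str.strip s)).filter (fun t => !(t == "")))) []
  -- query_keywords = query.lower().split()
  let query_keywords := PySem.Str.split₀ (PySem.Str.lower query)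
  -- for sentence in sentences: match_count = sum(1 for keyword in query_keywords if keyword.lower() in sentence.lower()); if match_count > 0: append (sentence, match_count)
  let relevant_sentences : List (String × Int) :=
    sentences.foldl (fun acc sentence =>
      let match_count : Int :=
        ((query_keywords.filter (fun keyword =>
            PySem.Str.isIn (PySem.Str.lower keyword) (PySem.Str.lower sentence))).map (fun _ => (1 : Int))).sum
      if 0 < match_count then acc ++ [(sentence, match_count)] else acc) []
  -- relevant_sentences.sort(key=lambda x: x[1], reverse=True); top = [s[0] for s in relevant_sentences[:3]]
  let sorted_rel := PySem.List.sorted relevant_sentences (fun p => p.2) true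
  let top_sentences := (PySem.List.slice sorted_rel none (some 3)).map (fun p => p.1)
  -- if not top_sentences: top_sentences = sentences[:3] if len(sentences) >= 3 else sentences
  let top_sentences :=
    if top_sentences = [] then
      (if 3 ≤ sentences.length then PySem.List.slice sentences none (some 3) else sentences)
    else top_sentences
  let response := "Based on the retrieved documents:\n\n"
  let response := response ++ PySem.Str.join ". " top_sentences
  if !(PySem.Str.endswith response ".") then response ++ "." else response

-- ===== PORT B =====
def generate_extractive_response_alt (query : String) (documents : List String) : String :=
  -- sentences = [t for doc in documents for t in (p.strip() for p in doc.replace("\n"," ").split(". ")) if t]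
  let sentences : List String :=
    documents.flatMap (fun doc =>
      ((((PySem.Str.split? (PySem.Str.replace doc "\n" " ") ". ").getD []).map (fun s => PySem.Str.strip s)).filter (fun t => !(t == ""))))   -- sep ". " ≠ "", so split? is always `some`
  -- keywords = query.lower().split()
  let keywords := PySem.Str.split₀ (PySem.Str.lower query)
  -- scores = [sum(kw in s.lower() for kw in keywords) for s in sentences]  (sum of booleans = count)
  let scores : List Int := sentences.map (fun s =>
    (((keywords.filter (fun kw => PySem.Str.isIn kw (PySem.Str.lower s))).length : Int)))
  -- top = [s for k in range(len(keywords), 0, -1) for s, c in zip(sentences, scores) if c == k][:3]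
  let top := PySem.List.slice
      ((PySem.List.pyRange (keywords.length : Int) 0 (-1)).flatMap (fun k =>
        ((sentences.zip scores).filter (fun p => p.2 == k)).map (fun p => p.1))) none (some 3)
  -- if not top: top = sentences[:3]
  let top := if top = [] then PySem.List.slice sentences none (some 3) else top
  let out := "Based on the retrieved documents:\n\n" ++ PySem.Str.join ". " top
  if !(PySem.Str.endswith out ".") then out ++ "." else out

-- ===== PRECONDITION & SPEC =====
def Spec_generate_extractive_response (query : String) (documents : List String) (out : String) : Prop := out = generate_extractive_response_alt query documents
instance (query : String) (documents : List String) (out : String) : Decidable (Spec_generate_extractive_response query documents out) := by unfold Spec_generate_extractive_response; infer_instance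

-- ===== CLAIM (what is proved, stated in full; the proofs are below) =====
def Claim_equal_generate_extractive_response : Prop := ∀ (query : String) (documents : List String), Dom_generate_extractive_response query documents → Spec_generate_extractive_response query documents (generate_extractive_response query documents)


-- ===== LEMMAS AND PROOFS =====

-- Char.ofNat at a valid code point
theorem pvToNat_ofNat (n : Nat) (h : Nat.isValidChar n) : (Char.ofNat n).toNat = n := by
  rw [Char.ofNat, dif_pos h]; rfl

theorem pvLowerChar_eq_of_upper (c : Char) (h : 'A' ≤ c ∧ c ≤ 'Z') :
    PySem.Chars.lowerChar c = Char.ofNat (c.toNat + 32) := by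
  unfold PySem.Chars.lowerChar PySem.Chars.isupper
  rw [if_pos (by simp only [Bool.and_eq_true, decide_eq_true_eq]; exact h)]

theorem pvLowerChar_eq_of_not_upper (c : Char) (h : ¬ ('A' ≤ c ∧ c ≤ 'Z')) :
    PySem.Chars.lowerChar c = c := by
  unfold PySem.Chars.lowerChar PySem.Chars.isupper
  rw [if_neg (by simp only [Bool.and_eq_true, decide_eq_true_eq]; exact h)]

-- lowering is idempotent on a character
theorem pvLowerChar_idem (c : Char) :
    PySem.Chars.lowerChar (PySem.Chars.lowerChar c) = PySem.Chars.lowerChar c := by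
  by_cases h : ('A' ≤ c ∧ c ≤ 'Z')
  · rw [pvLowerChar_eq_of_upper c h]
    apply pvLowerChar_eq_of_not_upper
    have hlo : 65 ≤ c.toNat ∧ c.toNat ≤ 90 := by
      obtain ⟨h1, h2⟩ := h
      rw [Char.le_def] at h1 h2
      exact ⟨h1, h2⟩
    have ht : (Char.ofNat (c.toNat + 32)).toNat = c.toNat + 32 :=
      pvToNat_ofNat _ (Or.inl (by omega))
    rintro ⟨h1, h2⟩
    simp only [Char.le_def, UInt32.le_iff_toNat_le] at h2
    have h2' : (Char.ofNat (c.toNat + 32)).toNat ≤ 90 := h2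
    omega
  · rw [pvLowerChar_eq_of_not_upper c h]
    exact pvLowerChar_eq_of_not_upper c h

-- every character of a piece of split₀ comes from the split string (go-invariant)
theorem pvSplit0_go_chars : ∀ (s cur : List Char) (acc : List (List Char)) (w : List Char),
    w ∈ PySem.Chars.split₀.go s cur acc → ∀ c ∈ w, c ∈ s ∨ c ∈ cur ∨ ∃ a ∈ acc, c ∈ a := by
  intro s
  induction s with
  | nil =>
    intro cur acc w hw c hc
    rw [PySem.Chars.split₀.go] at hw
    split at hw
    · right; right
      exact ⟨w, List.mem_reverse.mp hw, hc⟩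
    · rw [List.mem_reverse, List.mem_cons] at hw
      rcases hw with rfl | hw
      · right; left; exact List.mem_reverse.mp hc
      · right; right; exact ⟨w, hw, hc⟩
  | cons x rest ih =>
    intro cur acc w hw c hc
    rw [PySem.Chars.split₀.go] at hw
    split at hw
    · split at hw
      · rcases ih [] acc w hw c hc with h | h | h
        · left; exact List.mem_cons_of_mem _ h
        · simp at h
        · right; right; exact h
      · rcases ih [] (cur.reverse :: acc) w hw c hc with h | h | h
        · left; exact List.mem_cons_of_mem _ h
        · simp at h
        · rcases h with ⟨a, ha, hca⟩
          rcases List.mem_cons.mp ha with rfl | ha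
          · right; left; exact List.mem_reverse.mp hca
          · right; right; exact ⟨a, ha, hca⟩
    · rcases ih (x :: cur) acc w hw c hc with h | h | h
      · left; exact List.mem_cons_of_mem _ h
      · rcases List.mem_cons.mp h with rfl | h
        · left; exact List.mem_cons_self
        · right; left; exact h
      · right; right; exact h

-- a keyword produced by query.lower().split() is already lowercase
theorem pvKeyword_lower_fixed (query kw : String)
    (h : kw ∈ PySem.Str.split₀ (PySem.Str.lower query)) : PySem.Str.lower kw = kw := by
  apply String.toList_inj.mp
  rw [PySem.Str.toList_lower]
  have hmem : kw.toList ∈ PySem.Chars.split₀ (PySem.Chars.lower query.toList) := by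
    rw [← PySem.Str.toList_lower, ← PySem.Str.split₀_map_toList]
    exact List.mem_map_of_mem h
  have hchars : ∀ c ∈ kw.toList, c ∈ PySem.Chars.lower query.toList := by
    intro c hc
    rcases pvSplit0_go_chars _ [] [] _ hmem c hc with h' | h' | h'
    · exact h'
    · simp at h'
    · simp at h'
  conv_rhs => rw [← List.map_id kw.toList]
  unfold PySem.Chars.lower
  apply List.map_congr_left
  intro c hc
  obtain ⟨c', _, rfl⟩ := List.mem_map.mp (by
    have hcq := hchars c hc
    unfold PySem.Chars.lower at hcq
    exact hcq)
  exact pvLowerChar_idem c'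

-- insertBy walks past a block it does not insert into
theorem pvInsertBy_skip {α : Type} (before : α → α → Bool) (x : α) (A B : List α)
    (h : ∀ a ∈ A, before x a = false) :
    PySem.List.insertBy before x (A ++ B) = A ++ PySem.List.insertBy before x B := by
  induction A with
  | nil => rfl
  | cons a A ih =>
    simp only [List.cons_append, PySem.List.insertBy, h a (by simp), Bool.false_eq_true,
      if_false, List.cons.injEq, true_and]
    exact ih (fun a ha => h a (by simp [ha]))

-- inserting one element into the bucket concatenation appends it to its bucket
theorem pvInsert_flatMap {α : Type} (key : α → Int) (x : α) (S : List Int)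
    (hS : S.Pairwise (fun a b => b < a)) (hx : key x ∈ S) (xs : List α) :
    PySem.List.insertBy (fun a b => decide (key b < key a)) x
      (S.flatMap (fun s => xs.filter (fun y => key y == s)))
    = S.flatMap (fun s => (xs ++ [x]).filter (fun y => key y == s)) := by
  induction S with
  | nil => exact absurd hx (by simp)
  | cons s S ih =>
    have hlt : ∀ s' ∈ S, s' < s := (List.pairwise_cons.mp hS).1
    have hS' := (List.pairwise_cons.mp hS).2
    simp only [List.flatMap_cons]
    by_cases hks : key x = s
    · -- x goes to the end of the first bucket
      have hA : ∀ a ∈ xs.filter (fun y => key y == s), (fun a b => decide (key b < key a)) x a = false := by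
        intro a ha
        have ha2 := (List.mem_filter.mp ha).2
        simp only [beq_iff_eq] at ha2
        simp [ha2, hks]
      rw [pvInsertBy_skip _ _ _ _ hA]
      have hrest : S.flatMap (fun s => (xs ++ [x]).filter (fun y => key y == s))
          = S.flatMap (fun s => xs.filter (fun y => key y == s)) := by
        apply List.flatMap_congr
        intro s' hs'
        have hne : key x ≠ s' := by have := hlt s' hs'; omega
        simp [List.filter_append, hne]
      rw [hrest, List.filter_append]
      have hxs1 : List.filter (fun y => key y == s) [x] = [x] := by simp [hks]
      rw [hxs1]
      rcases hB : S.flatMap (fun s => xs.filter (fun y => key y == s)) with _ | ⟨b, B'⟩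
      · simp [PySem.List.insertBy]
      · have hb : key b < key x := by
          have hbm : b ∈ S.flatMap (fun s => xs.filter (fun y => key y == s)) := by rw [hB]; simp
          obtain ⟨s', hs', hbf⟩ := List.mem_flatMap.mp hbm
          have hb2 := (List.mem_filter.mp hbf).2
          simp only [beq_iff_eq] at hb2
          have := hlt s' hs'
          omega
        simp [PySem.List.insertBy, hb]
    · -- skip the first bucket entirely
      have hx' : key x ∈ S := by
        rcases List.mem_cons.mp hx with h | h
        · exact absurd h hks
        · exact h
      have hA : ∀ a ∈ xs.filter (fun y => key y == s), (fun a b => decide (key b < key a)) x a = false := by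
        intro a ha
        have ha2 := (List.mem_filter.mp ha).2
        simp only [beq_iff_eq] at ha2
        have hxlt : key x < s := by
          obtain ⟨s', hs', rfl⟩ : ∃ s' ∈ S, key x = s' := ⟨key x, hx', rfl⟩
          exact hlt _ hs'
        simp [ha2]; omega
      rw [pvInsertBy_skip _ _ _ _ hA, ih hS' hx']
      have hfx : List.filter (fun y => key y == s) (xs ++ [x]) = List.filter (fun y => key y == s) xs := by
        simp [List.filter_append, hks]
      rw [hfx]

-- stable descending sort = concatenation of the buckets along any strictly decreasing
-- score list covering all keys
theorem pvSorted_rev_eq_flatMap {α : Type} (key : α → Int) (xs : List α) (S : List Int)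
    (hS : S.Pairwise (fun a b => b < a)) (hxs : ∀ x ∈ xs, key x ∈ S) :
    PySem.List.sorted xs key true = S.flatMap (fun s => xs.filter (fun y => key y == s)) := by
  rw [PySem.List.sorted_rev_eq_foldl_insertBy]
  induction xs using List.reverseRecOn with
  | nil => simp
  | append_singleton xs x ih =>
    rw [List.foldl_append]
    simp only [List.foldl_cons, List.foldl_nil]
    rw [ih (fun y hy => hxs y (by simp [hy]))]
    exact pvInsert_flatMap key x S hS (hxs x (by simp)) xs

-- range(m, 0, -1) is strictly decreasing
theorem pvPyRange_down_pairwise (m : Int) :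
    (PySem.List.pyRange m 0 (-1)).Pairwise (fun a b => b < a) := by
  rw [PySem.List.pyRange_neg_one, List.pairwise_map]
  exact List.Pairwise.imp (fun h => by omega) List.pairwise_lt_range

-- A's conditional append loop collects the scored pairs
theorem pvFoldPairs (c : String → Int) (l : List String) (acc : List (String × Int)) :
    l.foldl (fun acc x => if 0 < c x then acc ++ [(x, c x)] else acc) acc
    = acc ++ (l.filter (fun x => decide (0 < c x))).map (fun x => (x, c x)) := by
  have h := PySem.List.foldl_append_if (fun x => decide (0 < c x)) (fun x => (x, c x)) l acc
  simpa using h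

theorem pvSlice3 {α : Type} (xs : List α) : PySem.List.slice xs none (some 3) = xs.take 3 := by
  rw [PySem.List.slice_to xs (by norm_num)]
  rfl

-- a sum of ones is a length
theorem pvSumOnes {α : Type} (l : List α) : (l.map (fun _ => (1 : Int))).sum = (l.length : Int) := by
  induction l with
  | nil => rfl
  | cons x xs ih =>
    simp only [List.map_cons, List.sum_cons, ih, List.length_cons]
    push_cast
    ring

-- zipping a list with its mapped copy pairs each element with its image
theorem pvZipMap {α β : Type} (f : α → β) (l : List α) :
    l.zip (l.map f) = l.map (fun x => (x, f x)) := by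
  induction l with
  | nil => rfl
  | cons x xs ih => simp [ih]

-- selecting a bucket from the paired list = filtering the plain list
theorem pvBucket {α : Type} (c : α → Int) (k : Int) (l : List α) :
    ((l.map (fun x => (x, c x))).filter (fun p => p.2 == k)).map (fun p => p.1)
    = l.filter (fun x => c x == k) := by
  induction l with
  | nil => rfl
  | cons x xs ih =>
    simp only [List.map_cons, List.filter_cons]
    by_cases h : c x == k <;> simp [h, ih]

-- the heart: A's collect/sort/take-3 selection equals B's threshold passes, for any
-- scoring function bounded by K
theorem pvTops_eq (c : String → Int) (K : Nat) (hub : ∀ x : String, c x ≤ (K : Int)) (l : List String) :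
    (if ((PySem.List.slice (PySem.List.sorted
            (l.foldl (fun acc x => if 0 < c x then acc ++ [(x, c x)] else acc) [])
            (fun p => p.2) true) none (some 3)).map (fun p => p.1)) = []
     then (if 3 ≤ l.length then PySem.List.slice l none (some 3) else l)
     else ((PySem.List.slice (PySem.List.sorted
            (l.foldl (fun acc x => if 0 < c x then acc ++ [(x, c x)] else acc) [])
            (fun p => p.2) true) none (some 3)).map (fun p => p.1)))
    = (if PySem.List.slice ((PySem.List.pyRange (K : Int) 0 (-1)).flatMap (fun k =>
          l.filter (fun x => c x == k))) none (some 3) = []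
       then PySem.List.slice l none (some 3)
       else PySem.List.slice ((PySem.List.pyRange (K : Int) 0 (-1)).flatMap (fun k =>
          l.filter (fun x => c x == k))) none (some 3)) := by
  rw [pvFoldPairs]
  simp only [List.nil_append]
  set F := l.filter (fun x => decide (0 < c x)) with hF
  have hFpos : ∀ x ∈ F, 0 < c x := by
    intro x hx
    have := (List.mem_filter.mp hx).2
    simpa using this
  -- B's per-level pass over l = the same pass over the positive-score sublist F
  have hbody : (PySem.List.pyRange (K : Int) 0 (-1)).flatMap (fun k => l.filter (fun x => c x == k))
      = (PySem.List.pyRange (K : Int) 0 (-1)).flatMap (fun k => F.filter (fun x => c x == k)) := by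
    apply List.flatMap_congr
    intro k hk
    have h1 : 0 < k := ((PySem.List.mem_pyRange_neg_one.mp hk)).1
    rw [hF, List.filter_filter]
    apply List.filter_congr
    intro x _
    by_cases h : c x = k
    · simp [h]; omega
    · simp [h]
  -- A's stable descending sort = buckets along range(K, 0, -1)
  have hsorted : PySem.List.sorted (F.map (fun x => (x, c x))) (fun p => p.2) true
      = (PySem.List.pyRange (K : Int) 0 (-1)).flatMap (fun s =>
          (F.map (fun x => (x, c x))).filter (fun p => p.2 == s)) := by
    apply pvSorted_rev_eq_flatMap
    · exact pvPyRange_down_pairwise _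
    · intro p hp
      obtain ⟨x, hx, rfl⟩ := List.mem_map.mp hp
      exact PySem.List.mem_pyRange_neg_one.mpr ⟨hFpos x hx, hub x⟩
  rw [hsorted, hbody]
  simp only [pvSlice3, List.map_take, List.map_flatMap, pvBucket]
  by_cases hX : ((PySem.List.pyRange (K : Int) 0 (-1)).flatMap (fun s =>
      F.filter (fun x => c x == s))).take 3 = []
  · rw [if_pos hX, if_pos hX]
    by_cases h3 : 3 ≤ l.length
    · rw [if_pos h3]
    · rw [if_neg h3]
      exact (List.take_of_length_le (by omega)).symm
  · rw [if_neg hX, if_neg hX]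

-- ===== VERDICT (by name: the statement is the Claim_ definition above) =====
theorem generate_extractive_response_spec : Claim_equal_generate_extractive_response := by
  intro query documents _
  unfold Spec_generate_extractive_response
  simp only [generate_extractive_response, generate_extractive_response_alt]
  rw [PySem.List.foldl_append_eq_flatMap]
  simp only [List.nil_append]
  have hk : ∀ sentence : String,
      (PySem.Str.split₀ (PySem.Str.lower query)).filter
        (fun keyword => PySem.Str.isIn (PySem.Str.lower keyword) (PySem.Str.lower sentence))
      = (PySem.Str.split₀ (PySem.Str.lower query)).filter
        (fun kw => PySem.Str.isIn kw (PySem.Str.lower sentence)) := by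
    intro sentence
    apply List.filter_congr
    intro kw hkw
    rw [pvKeyword_lower_fixed query kw hkw]
  simp only [hk, pvSumOnes, pvZipMap, pvBucket]
  rw [pvTops_eq
    (fun s => (((PySem.Str.split₀ (PySem.Str.lower query)).filter
        (fun kw => PySem.Str.isIn kw (PySem.Str.lower s))).length : Int))
    (PySem.Str.split₀ (PySem.Str.lower query)).length
    (fun s => by
      beta_reduce
      exact_mod_cast List.length_filter_le (fun kw => PySem.Str.isIn kw (PySem.Str.lower s))
        (PySem.Str.split₀ (PySem.Str.lower query)))]
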